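-- pv_equiv track=rewrite | github.com/ARK-De-v/codewares-problem-solving | Coding 3min : Remove screws I.py | sc
-- ===== SOURCE A (Python) =====
-- def sc(s):
--     sum =0
--     prev =None
--     for i in s:
--         if prev !=None and i!= prev:
--             sum += 5
--         sum+=2
--         prev =i
--     return sum-1
-- ===== SOURCE B (Python) =====
-- def sc(s):
--     if not s:
--         return -1
--     runs = []
--     i = 0
--     while i < len(s):
--         j = i
--         while j < len(s) and s[j] == s[i]:
--             j += 1
--         runs.append(j - i)
--         i = j
--     return 2 * sum(runs) + 5 * (len(runs) - 1) - 1
-- ===== Notes on version B (the rewrite author's own statement) =====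
-- stated objective: alternative
-- what changed: Replaces A's stateful prev-tracking accumulation loop with run-length encoding: split the string into maximal runs of equal characters with nested scans, then return 2*sum(runs) + 5*(number_of_runs - 1) - 1.
import Mathlib
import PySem

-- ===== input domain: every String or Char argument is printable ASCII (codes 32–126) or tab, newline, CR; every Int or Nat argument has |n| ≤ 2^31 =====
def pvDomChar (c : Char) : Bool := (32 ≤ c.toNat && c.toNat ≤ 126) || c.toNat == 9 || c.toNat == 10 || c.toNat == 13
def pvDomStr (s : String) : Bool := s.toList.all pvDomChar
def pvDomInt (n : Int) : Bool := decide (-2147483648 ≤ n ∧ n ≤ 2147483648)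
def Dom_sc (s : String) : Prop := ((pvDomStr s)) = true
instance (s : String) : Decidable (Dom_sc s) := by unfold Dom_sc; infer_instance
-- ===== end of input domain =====

-- B replaces A's stateful prev-tracking loop with run-length encoding: build the list of
-- maximal equal-character run lengths, then apply 2*sum + 5*(runs-1) - 1 (objective: alternative).

-- ===== PORT A =====
def sc (s : String) : Int :=
  (s.toList.foldl
    (fun (st : Int × Option Char) i =>
      let sum := if st.2 ≠ none ∧ some i ≠ st.2 then st.1 + 5 else st.1
      (sum + 2, some i))
    (0, none)).1 - 1

-- ===== PORT B =====
-- inner while loop of Source B: consume the maximal run of chars equal to s[i]; runs list built run by run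
def scRuns : List Char → List Nat
  | [] => []
  | a :: rest =>
      ((rest.takeWhile (· == a)).length + 1) :: scRuns (rest.dropWhile (· == a))
termination_by l => l.length
decreasing_by
  simp only [List.length_cons]
  exact Nat.lt_succ_of_le (List.length_dropWhile_le _ _)

def sc_alt (s : String) : Int :=
  match s.toList with
  | [] => -1
  | l@(_ :: _) =>
      let runs := scRuns l
      2 * (runs.sum : Int) + 5 * ((runs.length : Int) - 1) - 1

-- ===== PRECONDITION & SPEC =====
def Spec_sc (s : String) (out : Int) : Prop := out = sc_alt s
instance (s : String) (out : Int) : Decidable (Spec_sc s out) := by unfold Spec_sc; infer_instance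

-- ===== CLAIM (what is proved, stated in full; the proofs are below) =====
def Claim_equal_sc : Prop := ∀ (s : String), Dom_sc s → Spec_sc s (sc s)

-- ===== LEMMAS AND PROOFS =====
theorem scRuns_sum (l : List Char) : (scRuns l).sum = l.length := by
  induction l using scRuns.induct with
  | case1 => simp [scRuns]
  | case2 a rest ih =>
      simp [scRuns, ih]
      have := congrArg List.length
        (List.takeWhile_append_dropWhile (p := (· == a)) (l := rest))
      simp only [List.length_append] at this
      omega

theorem scRuns_len_eq (p : Char) (rest : List Char) :
    (scRuns (p :: p :: rest)).length = (scRuns (p :: rest)).length := by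
  simp [scRuns]

theorem scRuns_len_ne (a p : Char) (rest : List Char) (h : a ≠ p) :
    scRuns (p :: a :: rest) = 1 :: scRuns (a :: rest) := by
  simp [scRuns, h]

-- A's loop after having seen previous char p, with accumulator acc
theorem sc_foldl_inv (l : List Char) (p : Char) (acc : Int) :
    (l.foldl
      (fun (st : Int × Option Char) i =>
        let sum := if st.2 ≠ none ∧ some i ≠ st.2 then st.1 + 5 else st.1
        (sum + 2, some i))
      (acc, some p)).1
    = acc + 2 * l.length + 5 * ((scRuns (p :: l)).length - 1 : Int) := by
  induction l generalizing p acc with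
  | nil => simp [scRuns]
  | cons a rest ih =>
      simp only [List.foldl]
      rw [ih]
      by_cases h : a = p
      · subst h
        rw [scRuns_len_eq]
        simp
        ring
      · rw [scRuns_len_ne a p rest h]
        simp [h]
        ring

-- ===== VERDICT (by name: the statement is the Claim_ definition above) =====
theorem sc_spec : Claim_equal_sc := by
  intro s _
  unfold Spec_sc sc sc_alt
  cases h : s.toList with
  | nil => simp
  | cons a rest =>
      simp only [List.foldl]
      rw [sc_foldl_inv]
      have hs := scRuns_sum (a :: rest)
      simp only [List.length_cons] at hs
      simp only [ne_eq, not_true_eq_false, false_and, if_false, Nat.cast_list_sum]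
      rw [← Nat.cast_list_sum, hs]
      push_cast
      ring
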